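-- pv_equiv track=rewrite | github.com/ksayee/programming_assignments | python/CodingExercises/MaxDistinctLowerCaseCharactersBetween2Uppercase.py | MaxDistinctLowerCaseCharactersBetween2UpperCase
-- ===== SOURCE A (Python) =====
-- def MaxDistinctLowerCaseCharactersBetween2UpperCase(str1):
--
--     upper_flag=False
--     max_count=0
--     dict={}
--     count=0
--     for i in range(0,len(str1)):
--         key=str1[i]
--
--         if key>='A' and key<='Z':
--             if upper_flag==False:
--                 upper_flag=True
--             else:
--                 if count>0:
--                     if count > max_count:
--                         max_count=count
--                     count=0
--                     dict={}
--         else: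
--             if upper_flag==True:
--                 if key not in dict.keys():
--                     dict[key]=1
--                     count=count+1
--     return max_count
-- ===== SOURCE B (Python) =====
-- def MaxDistinctLowerCaseCharactersBetween2UpperCase(str1):
--     # Split-then-max: cut the string at uppercase letters, then take the max
--     # number of distinct characters over the gaps between consecutive
--     # uppercase letters (pieces[0] precedes the first uppercase letter; the
--     # chunk after the last uppercase letter is still in cur and never counted).
--     pieces = []
--     cur = []
--     for c in str1:
--         if 'A' <= c <= 'Z':
--             pieces.append(cur)
--             cur = []
--         else:
--             cur.append(c)
--     return max((len(set(p)) for p in pieces[1:]), default=0)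
-- ===== Notes on version B (the rewrite author's own statement) =====
-- stated objective: simpler
-- what changed: Replaces A's one-pass state machine (flag, running max, membership dict, counter) by a split-then-max decomposition: cut the string at uppercase letters, drop the piece before the first one and the trailing chunk, and return the max of len(set(piece)).
import Mathlib
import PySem

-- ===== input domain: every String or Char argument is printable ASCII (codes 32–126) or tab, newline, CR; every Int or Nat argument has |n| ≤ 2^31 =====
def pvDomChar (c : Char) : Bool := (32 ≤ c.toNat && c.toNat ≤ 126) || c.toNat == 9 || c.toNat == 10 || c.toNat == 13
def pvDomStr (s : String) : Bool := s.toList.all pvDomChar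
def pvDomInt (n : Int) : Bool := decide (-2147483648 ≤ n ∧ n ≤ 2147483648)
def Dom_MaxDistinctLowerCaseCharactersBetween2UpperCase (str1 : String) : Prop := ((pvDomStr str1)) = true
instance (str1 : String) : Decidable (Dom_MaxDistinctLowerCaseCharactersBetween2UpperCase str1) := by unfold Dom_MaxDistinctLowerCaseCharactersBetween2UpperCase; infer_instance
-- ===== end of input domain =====

-- B replaces A's one-pass flag/max/dict state machine by a split-then-max decomposition (objective: simpler).

-- ===== PORT A =====
-- one loop iteration of A: state = (upper_flag, max_count, dict, count)
def pvStepA (st : Bool × Int × PySem.Dict Char Int × Int) (key : Char) :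
    Bool × Int × PySem.Dict Char Int × Int :=
  let (upper_flag, max_count, d, count) := st
  if 'A' ≤ key ∧ key ≤ 'Z' then
    if upper_flag = false then (true, max_count, d, count)
    else
      if count > 0 then (upper_flag, if count > max_count then count else max_count, PySem.Dict.empty, 0)
      else (upper_flag, max_count, d, count)
  else
    if upper_flag = true then
      if d.contains key = false then (upper_flag, max_count, d.insert key 1, count + 1)
      else (upper_flag, max_count, d, count)
    else (upper_flag, max_count, d, count)

def MaxDistinctLowerCaseCharactersBetween2UpperCase (str1 : String) : Int :=
  (str1.toList.foldl pvStepA (false, 0, PySem.Dict.empty, 0)).2.1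

-- ===== PORT B =====
-- one loop iteration of B: state = (pieces, cur)
def pvStepB (st : List (List Char) × List Char) (c : Char) : List (List Char) × List Char :=
  if 'A' ≤ c ∧ c ≤ 'Z' then (st.1 ++ [st.2], []) else (st.1, st.2 ++ [c])

-- len(set(p))
def pvDistinctLen (p : List Char) : Int := PySem.Set.len (PySem.Set.ofList p)

def MaxDistinctLowerCaseCharactersBetween2UpperCase_alt (str1 : String) : Int :=
  let st := str1.toList.foldl pvStepB ([], [])
  (PySem.List.max? ((st.1.drop 1).map pvDistinctLen) (fun y => y)).getD 0

-- ===== PRECONDITION & SPEC =====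
def Spec_MaxDistinctLowerCaseCharactersBetween2UpperCase (str1 : String) (out : Int) : Prop := out = MaxDistinctLowerCaseCharactersBetween2UpperCase_alt str1
instance (str1 : String) (out : Int) : Decidable (Spec_MaxDistinctLowerCaseCharactersBetween2UpperCase str1 out) := by unfold Spec_MaxDistinctLowerCaseCharactersBetween2UpperCase; infer_instance

-- ===== CLAIM (what is proved, stated in full; the proofs are below) =====
def Claim_equal_MaxDistinctLowerCaseCharactersBetween2UpperCase : Prop := ∀ (str1 : String), Dom_MaxDistinctLowerCaseCharactersBetween2UpperCase str1 → Spec_MaxDistinctLowerCaseCharactersBetween2UpperCase str1 (MaxDistinctLowerCaseCharactersBetween2UpperCase str1)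

-- ===== LEMMAS AND PROOFS =====

-- max over the gap counts seen so far (B's final expression applied to a piece list)
def pvRes (ps : List (List Char)) : Int :=
  (PySem.List.max? (ps.map pvDistinctLen) (fun y => y)).getD 0

def pvInv (sa : Bool × Int × PySem.Dict Char Int × Int) (sb : List (List Char) × List Char) : Prop :=
  sa.1 = !sb.1.isEmpty ∧
  (sb.1 = [] → sa.2.1 = 0 ∧ sa.2.2.2 = 0 ∧ ∀ c, sa.2.2.1.contains c = false) ∧
  (sb.1 ≠ [] → sa.2.1 = pvRes (sb.1.drop 1) ∧ sa.2.2.2 = pvDistinctLen sb.2 ∧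
      ∀ c, sa.2.2.1.contains c = decide (c ∈ sb.2))

lemma ofList_append_singleton (xs : List Char) (x : Char) :
    PySem.Set.ofList (xs ++ [x]) = (PySem.Set.ofList xs).add x := by
  simp [PySem.Set.ofList_eq_foldl, List.foldl_append]

lemma contains_ofList_eq (xs : List Char) (x : Char) :
    (PySem.Set.ofList xs).contains x = decide (x ∈ xs) := by
  simp [PySem.Set.contains, PySem.Set.mem_ofList]

lemma distinctLen_append (xs : List Char) (x : Char) :
    pvDistinctLen (xs ++ [x]) =
      if x ∈ xs then pvDistinctLen xs else pvDistinctLen xs + 1 := by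
  simp only [pvDistinctLen, ofList_append_singleton, PySem.Set.add, contains_ofList_eq,
    PySem.Set.len_eq]
  by_cases h : x ∈ xs
  · simp [h]
  · simp only [h, decide_false, Bool.false_eq_true, if_false, List.length_append,
      List.length_cons, List.length_nil]
    push_cast
    ring

lemma distinctLen_nonneg (p : List Char) : 0 ≤ pvDistinctLen p := by
  simp [pvDistinctLen, PySem.Set.len_eq]

lemma distinctLen_nil : pvDistinctLen [] = 0 := rfl

lemma distinctLen_eq_zero (p : List Char) (h : pvDistinctLen p = 0) : p = [] := by
  cases p with
  | nil => rfl
  | cons c t =>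
    exfalso
    have hm : c ∈ PySem.Set.ofList (c :: t) := (PySem.Set.mem_ofList _ _).2 (by simp)
    have hpos : 0 < (PySem.Set.ofList (c :: t)).length := List.length_pos_of_mem hm
    simp only [pvDistinctLen, PySem.Set.len_eq] at h
    omega

lemma res_nil : pvRes [] = 0 := rfl

lemma res_cons_ge (p : List Char) (ps : List (List Char)) :
    pvDistinctLen p ≤ pvRes (p :: ps) := by
  simp only [pvRes, List.map_cons, PySem.List.max?_id_cons, Option.getD_some]
  exact (PySem.List.le_foldl_max (ps.map pvDistinctLen) (pvDistinctLen p)).1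

lemma res_nonneg (ps : List (List Char)) : 0 ≤ pvRes ps := by
  cases ps with
  | nil => simp [res_nil]
  | cons p t => exact le_trans (distinctLen_nonneg p) (res_cons_ge p t)

lemma res_append (ps : List (List Char)) (p : List Char) :
    pvRes (ps ++ [p]) = max (pvRes ps) (pvDistinctLen p) := by
  cases ps with
  | nil =>
    have h0 : pvRes ([p]) = pvDistinctLen p := by
      simp only [pvRes, List.map_cons, List.map_nil, PySem.List.max?_id_cons,
        List.foldl_nil, Option.getD_some]
    have h1 : pvRes ([] : List (List Char)) = 0 := rfl
    rw [List.nil_append, h0, h1, max_eq_right (distinctLen_nonneg p)]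
  | cons q t =>
    simp only [pvRes, List.map_append, List.map_cons, List.map_nil, List.cons_append,
      PySem.List.max?_id_cons, Option.getD_some]
    rw [List.foldl_append]
    simp

lemma inv_step (sa : Bool × Int × PySem.Dict Char Int × Int)
    (sb : List (List Char) × List Char) (c : Char) (h : pvInv sa sb) :
    pvInv (pvStepA sa c) (pvStepB sb c) := by
  obtain ⟨flag, mx, d, cnt⟩ := sa
  obtain ⟨pieces, cur⟩ := sb
  obtain ⟨h1, h2, h3⟩ := h
  simp only at h1 h2 h3
  by_cases hc : 'A' ≤ c ∧ c ≤ 'Z'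
  · have eB : pvStepB (pieces, cur) c = (pieces ++ [cur], []) := by simp [pvStepB, hc]
    cases pieces with
    | nil =>
      obtain ⟨hmx, hcnt, hd⟩ := h2 rfl
      have hflag : flag = false := by simpa using h1
      have eA : pvStepA (flag, mx, d, cnt) c = (true, mx, d, cnt) := by
        simp [pvStepA, hc, hflag]
      rw [eA, eB]
      refine ⟨by simp, by simp, fun _ => ?_⟩
      exact ⟨by simpa [res_nil] using hmx, by simpa [distinctLen_nil] using hcnt,
        by simpa using hd⟩
    | cons p ps =>
      have hflag : flag = true := by simpa using h1
      obtain ⟨hmx, hcnt, hd⟩ := h3 (by simp)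
      by_cases hcnt0 : cnt > 0
      · have eA : pvStepA (flag, mx, d, cnt) c =
            (flag, if cnt > mx then cnt else mx, PySem.Dict.empty, 0) := by
          simp [pvStepA, hc, hflag, hcnt0]
        rw [eA, eB]
        refine ⟨by simp [hflag], by simp, fun _ => ?_⟩
        refine ⟨?_, by simp [distinctLen_nil], fun x => by simp [PySem.Dict.empty, PySem.Dict.contains]⟩
        show (if cnt > mx then cnt else mx) = pvRes (((p :: ps) ++ [cur]).drop 1)
        have : ((p :: ps) ++ [cur]).drop 1 = ps ++ [cur] := by simp
        have hmx' : mx = pvRes ps := by simpa using hmx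
        rw [this, res_append, ← hmx', ← hcnt]
        by_cases hle : cnt ≤ mx
        · rw [max_eq_left hle, if_neg (by omega)]
        · rw [max_eq_right (by omega), if_pos (by omega)]
      · have hge : 0 ≤ cnt := by rw [hcnt]; exact distinctLen_nonneg cur
        have hcnt' : cnt = 0 := by omega
        have hcur : cur = [] := distinctLen_eq_zero cur (hcnt.symm.trans hcnt')
        have eA : pvStepA (flag, mx, d, cnt) c = (flag, mx, d, cnt) := by
          simp [pvStepA, hc, hflag, hcnt0]
        rw [eA, eB]
        refine ⟨by simp [hflag], by simp, fun _ => ?_⟩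
        refine ⟨?_, by simpa [hcur] using hcnt, by simpa [hcur] using hd⟩
        have : ((p :: ps) ++ [cur]).drop 1 = ps ++ [cur] := by simp
        rw [this, res_append, hcur, distinctLen_nil, max_eq_left (res_nonneg ps)]
        simpa using hmx
  · have eB : pvStepB (pieces, cur) c = (pieces, cur ++ [c]) := by simp [pvStepB, hc]
    cases pieces with
    | nil =>
      obtain ⟨hmx, hcnt, hd⟩ := h2 rfl
      have hflag : flag = false := by simpa using h1
      have eA : pvStepA (flag, mx, d, cnt) c = (flag, mx, d, cnt) := by
        simp [pvStepA, hc, hflag]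
      rw [eA, eB]
      exact ⟨by simp [hflag], fun _ => ⟨hmx, hcnt, hd⟩, by simp⟩
    | cons p ps =>
      have hflag : flag = true := by simpa using h1
      obtain ⟨hmx, hcnt, hd⟩ := h3 (by simp)
      by_cases hmem : c ∈ cur
      · have hcon : d.contains c = true := by rw [hd]; simp [hmem]
        have eA : pvStepA (flag, mx, d, cnt) c = (flag, mx, d, cnt) := by
          simp [pvStepA, hc, hflag, hcon]
        rw [eA, eB]
        refine ⟨by simp [hflag], by simp, fun _ => ?_⟩
        refine ⟨by simpa using hmx, ?_, fun x => ?_⟩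
        · rw [distinctLen_append, if_pos hmem]; exact hcnt
        · rw [hd]
          by_cases hx : x ∈ cur
          · simp [hx]
          · have hne : x ≠ c := fun he => hx (he ▸ hmem)
            simp [hx, hne]
      · have hcon : d.contains c = false := by rw [hd]; simp [hmem]
        have eA : pvStepA (flag, mx, d, cnt) c = (flag, mx, d.insert c 1, cnt + 1) := by
          simp [pvStepA, hc, hflag, hcon]
        rw [eA, eB]
        refine ⟨by simp [hflag], by simp, fun _ => ?_⟩
        refine ⟨by simpa using hmx, ?_, fun x => ?_⟩
        · rw [distinctLen_append, if_neg hmem, ← hcnt]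
        · rw [PySem.Dict.contains_insert, hd]
          by_cases hx : x = c
          · simp [hx]
          · simp [hx]

lemma inv_fold (l : List Char) (sa : Bool × Int × PySem.Dict Char Int × Int)
    (sb : List (List Char) × List Char) (h : pvInv sa sb) :
    pvInv (l.foldl pvStepA sa) (l.foldl pvStepB sb) := by
  induction l generalizing sa sb with
  | nil => exact h
  | cons c t ih => exact ih _ _ (inv_step _ _ _ h)

-- ===== VERDICT (by name: the statement is the Claim_ definition above) =====
theorem MaxDistinctLowerCaseCharactersBetween2UpperCase_spec : Claim_equal_MaxDistinctLowerCaseCharactersBetween2UpperCase := by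
  intro str1 _
  unfold Spec_MaxDistinctLowerCaseCharactersBetween2UpperCase
  have h0 : pvInv (false, 0, PySem.Dict.empty, 0) (([] : List (List Char)), ([] : List Char)) := by
    refine ⟨rfl, fun _ => ⟨rfl, rfl, fun c => ?_⟩, fun h => absurd rfl h⟩
    simp [PySem.Dict.contains, PySem.Dict.empty]
  obtain ⟨-, hnil, hcons⟩ := inv_fold str1.toList _ _ h0
  change (str1.toList.foldl pvStepA (false, 0, PySem.Dict.empty, 0)).2.1 =
    pvRes ((str1.toList.foldl pvStepB ([], [])).1.drop 1)
  by_cases hp : (str1.toList.foldl pvStepB ([], [])).1 = []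
  · rw [hp]
    exact (hnil hp).1
  · exact (hcons hp).1
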